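-- pv_equiv track=rewrite | github.com/mj-park-001/jin_tools | maya/lib/node/namespace.py | replace_namespace
-- ===== SOURCE A (Python) =====
-- from typing import Tuple, List
--
-- def get_namespace_and_node(node: str) -> Tuple[str, str]:
--     """Get the namespace and exact node name.
--
--     Args:
--         node: The node name.
--
--     Returns:
--         A tuple containing (namespace, node_name).
--     """
--     namespace, separator, name = str(node).rpartition('|')[-1].rpartition(':')
--
--     return namespace, name
--
-- def get_node(node: str) -> str:
--     """Only get the exact node name without the namespace or parents.
--
--     Args:
--         node: The node name.
--
--     Returns:
--         The node name without namespace or path.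
--     """
--     return get_namespace_and_node(node)[1]
--
-- def replace_namespace(node: str, namespace: str) -> str:
--     """Return the node path string with the specified namespace applied.
--
--     Args:
--         node: The node name.
--         namespace: The new namespace (can be None or empty for no namespace).
--
--     Returns:
--         The modified node name with the new namespace.
--     """
--     path = node.split('|')
--     path = [get_node(name) for name in path]
--
--     if not namespace:
--         # No namespace - return plain node names
--         return '|'.join([name if name else '' for name in path])
--
--     if not namespace.endswith(':'):
--         namespace += ':'
--
--     return '|'.join(['{}{}'.format(namespace, name) if name else '' for name in path])
-- ===== SOURCE B (Python) =====
-- def replace_namespace(node: str, namespace: str) -> str: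
--     """Single reverse scan: walk the path backwards, copying each segment's
--     chars until a ':' is seen (then skip the old namespace part), and splice
--     the new namespace in front of every non-empty segment at its '|' boundary.
--     No split/list of segments is ever built."""
--     ns = ''
--     if namespace:
--         ns = namespace if namespace.endswith(':') else namespace + ':'
--     out = []           # result chars, collected in reverse order
--     nonempty = False   # current segment has kept chars
--     skipping = False   # we are inside the stripped namespace part of a segment
--     for ch in reversed(node):
--         if ch == '|':
--             if nonempty and ns:
--                 out.extend(reversed(ns))
--             out.append('|')
--             nonempty = False
--             skipping = False
--         elif skipping:
--             continue
--         elif ch == ':':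
--             skipping = True
--         else:
--             out.append(ch)
--             nonempty = True
--     if nonempty and ns:
--         out.extend(reversed(ns))
--     return ''.join(reversed(out))
-- ===== Notes on version B (the rewrite author's own statement) =====
-- stated objective: alternative
-- what changed: Replaced the split('|') / per-segment rpartition(':') / join pipeline by a single reverse character scan with a skip flag that drops each segment's old namespace and splices the new one in at segment boundaries; no segment list is built.
import Mathlib
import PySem

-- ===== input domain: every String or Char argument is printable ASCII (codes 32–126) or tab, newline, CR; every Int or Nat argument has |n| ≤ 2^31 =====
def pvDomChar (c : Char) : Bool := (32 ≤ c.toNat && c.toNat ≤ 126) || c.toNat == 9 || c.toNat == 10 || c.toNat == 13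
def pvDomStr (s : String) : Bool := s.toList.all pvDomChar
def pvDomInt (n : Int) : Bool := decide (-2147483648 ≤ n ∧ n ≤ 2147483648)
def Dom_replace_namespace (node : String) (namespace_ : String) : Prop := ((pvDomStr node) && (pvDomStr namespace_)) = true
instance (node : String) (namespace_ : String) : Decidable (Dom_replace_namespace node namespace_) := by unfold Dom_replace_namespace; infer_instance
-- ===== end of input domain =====

-- B replaces A's split/rpartition/join pipeline by a single reverse character scan
-- with a skip flag (objective: alternative; same O(n) cost, no segment list built).

-- ===== PORT A =====
-- hand port of Python str.rpartition(sep) for a one-char sep (PySem has no rpartition);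
-- exact: splits at the LAST occurrence, ('', '', s) when sep is absent
def pyRpartition (cs : List Char) (sep : Char) : List Char × List Char × List Char :=
  match cs with
  | [] => ([], [], [])
  | c :: rest =>
      let r := pyRpartition rest sep
      if r.2.1 ≠ [] then (c :: r.1, r.2.1, r.2.2)
      else if c = sep then ([], [sep], rest)
      else ([], [], c :: rest)

def get_namespace_and_node (node : List Char) : List Char × List Char :=
  let t := pyRpartition (pyRpartition node '|').2.2 ':'
  (t.1, t.2.2)

def get_node (node : List Char) : List Char :=
  (get_namespace_and_node node).2

def replace_namespace (node : String) (namespace_ : String) : String :=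
  let path := PySem.Chars.splitOn node.toList ['|']
  let path := path.map (fun name => get_node name)
  if namespace_.toList.isEmpty then
    String.mk (PySem.Chars.join ['|'] (path.map (fun name => if !name.isEmpty then name else [])))
  else
    let ns := if PySem.Chars.endswith namespace_.toList [':'] then namespace_.toList
              else namespace_.toList ++ [':']
    String.mk (PySem.Chars.join ['|'] (path.map (fun name => if !name.isEmpty then ns ++ name else [])))

-- ===== PORT B =====
-- Source B iterates over reversed(node) appending to a reversed accumulator and reverses
-- at the end; that is expressed here as a foldr over the char list with the
-- accumulator kept in final order (same scan, same state: acc, nonempty, skipping).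
def altStep (ns : List Char) (c : Char) (st : List Char × Bool × Bool) : List Char × Bool × Bool :=
  if c = '|' then
    ('|' :: (if st.2.1 && !ns.isEmpty then ns ++ st.1 else st.1), false, false)
  else if st.2.2 then st
  else if c = ':' then (st.1, st.2.1, true)
  else (c :: st.1, true, st.2.2)

def replace_namespace_alt (node : String) (namespace_ : String) : String :=
  let ns : List Char :=
    if namespace_.toList.isEmpty then []
    else if PySem.Chars.endswith namespace_.toList [':'] then namespace_.toList
    else namespace_.toList ++ [':']
  let st := node.toList.foldr (altStep ns) ([], false, false)
  String.mk (if st.2.1 && !ns.isEmpty then ns ++ st.1 else st.1)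

-- ===== PRECONDITION & SPEC =====
def Spec_replace_namespace (node : String) (namespace_ : String) (out : String) : Prop := out = replace_namespace_alt node namespace_
instance (node : String) (namespace_ : String) (out : String) : Decidable (Spec_replace_namespace node namespace_ out) := by unfold Spec_replace_namespace; infer_instance

-- ===== CLAIM (what is proved, stated in full; the proofs are below) =====
def Claim_equal_replace_namespace : Prop := ∀ (node : String) (namespace_ : String), Dom_replace_namespace node namespace_ → Spec_replace_namespace node namespace_ (replace_namespace node namespace_)

-- ===== LEMMAS AND PROOFS =====

-- the suffix of cs after its last ':' (cs itself if none)
def stripNS : List Char → List Char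
  | [] => []
  | c :: rest => if ':' ∈ rest then stripNS rest else if c = ':' then rest else c :: rest

-- prefix ns to a non-empty segment
def appNS (ns x : List Char) : List Char :=
  if !x.isEmpty && !ns.isEmpty then ns ++ x else x

-- common reference: per-segment (split at first '|') strip + prefix
def refNS (ns : List Char) (cs : List Char) : List Char :=
  appNS ns (stripNS (cs.takeWhile (· ≠ '|'))) ++
    (match h : cs.dropWhile (· ≠ '|') with
     | [] => []
     | _ :: rest => '|' :: refNS ns rest)
termination_by cs.length
decreasing_by
  have h1 : (cs.dropWhile (· ≠ '|')).length ≤ cs.length :=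
    (List.dropWhile_sublist _).length_le
  rw [h] at h1; simp at h1; omega

-- reference for splitOn: split cs on '|' with pending prefix pre
def mySplit (pre : List Char) : List Char → List (List Char)
  | [] => [pre]
  | c :: rest => if c = '|' then pre :: mySplit [] rest else mySplit (pre ++ [c]) rest

theorem go_spec (fuel : Nat) : ∀ (l cur : List Char) (accs : List (List Char)),
    l.length < fuel →
    PySem.Chars.splitOn.go ['|'] fuel l cur accs = accs.reverse ++ mySplit cur.reverse l := by
  induction fuel with
  | zero => intro l cur accs h; omega
  | succ n ih =>
      intro l cur accs h
      cases l with
      | nil => simp [PySem.Chars.splitOn.go, mySplit]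
      | cons c rest =>
          rw [PySem.Chars.splitOn.go]
          by_cases hc : c = '|'
          · subst hc
            simp only [List.isPrefixOf, BEq.rfl, Bool.true_and, if_pos, List.length_cons, List.drop_succ_cons, List.length_nil, List.drop_zero]
            rw [ih rest [] (cur.reverse :: accs) (by simp at h; omega)]
            simp [mySplit]
          · have hpre : List.isPrefixOf ['|'] (c :: rest) = false := by
              simp [List.isPrefixOf]; exact fun hh => (hc hh.symm).elim
            simp only [hpre, Bool.false_eq_true, if_false]
            rw [ih rest (c :: cur) accs (by simp at h; omega)]
            simp [mySplit, hc]

theorem splitOn_eq_mySplit (cs : List Char) :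
    PySem.Chars.splitOn cs ['|'] = mySplit [] cs := by
  have := go_spec (cs.length + 1) cs [] [] (by omega)
  simpa [PySem.Chars.splitOn] using this

theorem mySplit_eq (cs : List Char) : ∀ (pre : List Char),
    mySplit pre cs = (pre ++ cs.takeWhile (· ≠ '|')) ::
      (match cs.dropWhile (· ≠ '|') with
       | [] => []
       | _ :: rest => mySplit [] rest) := by
  induction cs with
  | nil => intro pre; simp [mySplit]
  | cons c rest ih =>
      intro pre
      by_cases hc : c = '|'
      · subst hc; simp [mySplit, List.takeWhile, List.dropWhile]
      · simp only [mySplit, if_neg hc, ih (pre ++ [c]),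
          List.takeWhile_cons, List.dropWhile_cons, decide_eq_true_eq]
        simp [hc]

theorem rpart_found (cs : List Char) (s : Char) :
    (pyRpartition cs s).2.1 ≠ [] ↔ s ∈ cs := by
  induction cs with
  | nil => simp [pyRpartition]
  | cons c rest ih =>
      rw [pyRpartition]
      split_ifs with h1 h2
      · simp [ih.mp h1, h1]
      · simp [h2]
      · have hnr : s ∉ rest := fun hm => h1 (ih.mpr hm)
        have hcs : s ≠ c := Ne.symm h2
        simp [List.mem_cons, hnr, hcs]

theorem rpart_tail (cs : List Char) : (pyRpartition cs ':').2.2 = stripNS cs := by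
  induction cs with
  | nil => simp [pyRpartition, stripNS]
  | cons c rest ih =>
      rw [pyRpartition, stripNS]
      by_cases hm : ':' ∈ rest
      · have hf : (pyRpartition rest ':').2.1 ≠ [] := (rpart_found rest ':').mpr hm
        simp [hf, hm, ih]
      · have hf : ¬ (pyRpartition rest ':').2.1 ≠ [] := by
          simp; by_contra hh; exact hm ((rpart_found rest ':').mp (by simpa using hh))
        by_cases hc : c = ':'
        · simp [hf, hc, hm]
        · simp [hf, hc, hm]

theorem rpart_absent (cs : List Char) (s : Char) (h : s ∉ cs) :
    pyRpartition cs s = ([], [], cs) := by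
  induction cs with
  | nil => simp [pyRpartition]
  | cons c rest ih =>
      have hr : s ∉ rest := fun hh => h (List.mem_cons_of_mem _ hh)
      have hc : c ≠ s := fun hh => h (by simp [hh])
      rw [pyRpartition, ih hr]
      simp [hc]

theorem get_node_eq (seg : List Char) (h : '|' ∉ seg) :
    get_node seg = stripNS seg := by
  unfold get_node get_namespace_and_node
  rw [rpart_absent seg '|' h]
  simpa using rpart_tail seg

-- segment lemma for B's scan: on a '|'-free segment the scan computes the strip
theorem foldr_seg (ns : List Char) : ∀ (seg acc : List Char), '|' ∉ seg →
    seg.foldr (altStep ns) (acc, false, false) =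
      (stripNS seg ++ acc, !(stripNS seg).isEmpty, decide (':' ∈ seg)) := by
  intro seg
  induction seg with
  | nil => intro acc h; simp [stripNS]
  | cons c rest ih =>
      intro acc h
      have hrb : '|' ∉ rest := fun hh => h (List.mem_cons_of_mem _ hh)
      have hcb : c ≠ '|' := fun hh => h (by simp [hh])
      rw [List.foldr_cons, ih acc hrb]
      by_cases hm : ':' ∈ rest
      · simp [altStep, stripNS, hm, hcb]
      · by_cases hc : c = ':'
        · simp [altStep, stripNS, hm, hc]
          cases rest with
          | nil => simp [stripNS]
          | cons d tl =>
              have : stripNS (d :: tl) = d :: tl := by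
                rw [stripNS]
                have hd : d ≠ ':' := fun hh => hm (by simp [hh])
                have htl : ':' ∉ tl := fun hh => hm (List.mem_cons_of_mem _ hh)
                simp [htl, hd]
              simp [this]
        · have : stripNS rest = rest := by
            cases rest with
            | nil => simp [stripNS]
            | cons d tl =>
                rw [stripNS]
                have hd : d ≠ ':' := fun hh => hm (by simp [hh])
                have htl : ':' ∉ tl := fun hh => hm (List.mem_cons_of_mem _ hh)
                simp [htl, hd]
          simp [altStep, stripNS, hm, hc, Ne.symm hc, hcb, this]

-- the tail of the output: nothing if no '|', else '|' and the rest of the path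
def restPart (ns : List Char) (cs : List Char) : List Char :=
  match cs.dropWhile (· ≠ '|') with
  | [] => []
  | _ :: rest => '|' :: refNS ns rest

theorem dropWhile_head_bar (cs : List Char) (x : Char) (rest : List Char)
    (hd : List.dropWhile (fun c => decide (c ≠ '|')) cs = x :: rest) : x = '|' := by
  induction cs with
  | nil => simp at hd
  | cons c tl ih =>
      rw [List.dropWhile_cons] at hd
      by_cases hc : c = '|'
      · simp [hc] at hd
        exact hd.1.symm
      · rw [if_pos (by simp [hc])] at hd
        exact ih hd

theorem restPart_nil (ns cs) (h : cs.dropWhile (· ≠ '|') = []) :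
    restPart ns cs = [] := by
  unfold restPart; rw [h]

theorem restPart_cons (ns cs x rest) (h : cs.dropWhile (· ≠ '|') = x :: rest) :
    restPart ns cs = '|' :: refNS ns rest := by
  unfold restPart; rw [h]

theorem refNS_eq (ns cs) :
    refNS ns cs = appNS ns (stripNS (cs.takeWhile (· ≠ '|'))) ++ restPart ns cs := by
  rw [refNS]
  congr 1
  split
  · next h => rw [restPart_nil ns cs h]
  · next x rest h => rw [restPart_cons ns cs x rest h]

theorem flush_eq (ns s r : List Char) :
    (if !s.isEmpty && !ns.isEmpty then ns ++ (s ++ r) else s ++ r) = appNS ns s ++ r := by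
  unfold appNS
  by_cases h : (!s.isEmpty && !ns.isEmpty) = true
  · simp [h, List.append_assoc]
  · simp [h]

-- B's scan over the whole string, by the segment decomposition of refNS
theorem foldr_spec (ns : List Char) (cs : List Char) :
    cs.foldr (altStep ns) ([], false, false) =
      (stripNS (cs.takeWhile (· ≠ '|')) ++ restPart ns cs,
       !(stripNS (cs.takeWhile (· ≠ '|'))).isEmpty,
       decide (':' ∈ cs.takeWhile (· ≠ '|'))) := by
  induction cs using refNS.induct with
  | _ cs ih =>
    have hsplit := List.takeWhile_append_dropWhile (p := (· ≠ '|')) (l := cs)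
    have htw : '|' ∉ cs.takeWhile (· ≠ '|') := by
      intro hh
      have := List.mem_takeWhile_imp hh
      simp at this
    rcases hd : cs.dropWhile (· ≠ '|') with _ | ⟨x, rest⟩
    · conv_lhs => rw [← hsplit]
      rw [hd, List.append_nil, foldr_seg ns _ _ htw, restPart_nil ns cs hd,
        List.append_nil]
    · have hx : x = '|' := dropWhile_head_bar cs x rest hd
      conv_lhs => rw [← hsplit]
      rw [List.foldr_append, hd, List.foldr_cons, ih x rest hd, hx]
      have hstep : altStep ns '|'
          (stripNS (rest.takeWhile (· ≠ '|')) ++ restPart ns rest,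
           !(stripNS (rest.takeWhile (· ≠ '|'))).isEmpty,
           decide (':' ∈ rest.takeWhile (· ≠ '|'))) =
          ('|' :: refNS ns rest, false, false) := by
        simp only [altStep, reduceIte, refNS_eq, flush_eq]
      rw [hstep, foldr_seg ns _ _ htw, restPart_cons ns cs x rest hd]

theorem alt_eq_ref (node namespace_ : String) :
    replace_namespace_alt node namespace_ =
      String.mk (refNS
        (if namespace_.toList.isEmpty then []
         else if PySem.Chars.endswith namespace_.toList [':'] then namespace_.toList
         else namespace_.toList ++ [':']) node.toList) := by
  simp only [replace_namespace_alt]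
  set ns := (if namespace_.toList.isEmpty then []
             else if PySem.Chars.endswith namespace_.toList [':'] then namespace_.toList
             else namespace_.toList ++ [':']) with hns
  rw [foldr_spec ns node.toList]
  rw [refNS_eq]
  exact congrArg String.mk (flush_eq ns _ _)

-- every piece produced by mySplit [] is '|'-free
theorem mySplit_no_bar (cs : List Char) : ∀ (pre : List Char), '|' ∉ pre →
    ∀ seg ∈ mySplit pre cs, '|' ∉ seg := by
  induction cs with
  | nil => intro pre hp seg hseg; rw [mySplit] at hseg; simp at hseg; subst hseg; exact hp
  | cons c rest ih =>
      intro pre hp seg hseg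
      by_cases hc : c = '|'
      · subst hc; rw [mySplit] at hseg; simp at hseg
        rcases hseg with h1 | h1
        · subst h1; exact hp
        · exact ih [] (by simp) seg h1
      · rw [mySplit, if_neg hc] at hseg
        exact ih (pre ++ [c]) (by simp [hp, Ne.symm hc]) seg hseg

-- A's mapped-and-joined segment list, by the same decomposition as refNS
theorem joinA_eq_ref (ns : List Char) (cs : List Char) :
    PySem.Chars.join ['|'] ((mySplit [] cs).map (fun seg => appNS ns (stripNS seg))) =
      refNS ns cs := by
  induction cs using refNS.induct with
  | _ cs ih =>
    rcases hd : cs.dropWhile (· ≠ '|') with _ | ⟨x, rest⟩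
    · rw [mySplit_eq cs [], hd]
      simp only [List.nil_append, List.map_cons, List.map_nil]
      rw [PySem.Chars.join_singleton, refNS_eq, restPart_nil ns cs hd, List.append_nil]
    · have ih' := ih x rest hd
      rw [mySplit_eq rest []] at ih'
      simp only [List.nil_append, List.map_cons] at ih'
      rw [mySplit_eq cs [], hd]
      simp only [List.nil_append, List.map_cons]
      rw [mySplit_eq rest []]
      simp only [List.nil_append, List.map_cons]
      rw [PySem.Chars.join_cons_cons, ih', refNS_eq ns cs, restPart_cons ns cs x rest hd]
      simp

theorem appA_empty (x : List Char) : (if !x.isEmpty then x else []) = appNS [] x := by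
  cases x <;> simp [appNS]

theorem appA_ns (ns x : List Char) (h : ¬ ns.isEmpty = true) :
    (if !x.isEmpty then ns ++ x else []) = appNS ns x := by
  cases x <;> simp [appNS, h]

theorem a_eq_ref (node namespace_ : String) :
    replace_namespace node namespace_ =
      String.mk (refNS
        (if namespace_.toList.isEmpty then []
         else if PySem.Chars.endswith namespace_.toList [':'] then namespace_.toList
         else namespace_.toList ++ [':']) node.toList) := by
  simp only [replace_namespace]
  rw [splitOn_eq_mySplit]
  have hmap : (mySplit [] node.toList).map (fun name => get_node name) =
      (mySplit [] node.toList).map stripNS := by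
    apply List.map_congr_left
    intro seg hseg
    exact get_node_eq seg (mySplit_no_bar node.toList [] (by simp) seg hseg)
  by_cases hns : namespace_.toList.isEmpty
  · rw [if_pos hns, if_pos hns, hmap, List.map_map]
    rw [← joinA_eq_ref [] node.toList]
    congr 2
    apply List.map_congr_left
    intro seg _
    simp only [Function.comp]
    exact appA_empty (stripNS seg)
  · rw [if_neg hns, if_neg hns, hmap, List.map_map]
    set ns := (if PySem.Chars.endswith namespace_.toList [':'] then namespace_.toList
               else namespace_.toList ++ [':']) with hnsdef
    have hne : ¬ ns.isEmpty = true := by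
      rw [hnsdef]
      by_cases hh : PySem.Chars.endswith namespace_.toList [':'] = true
      · simpa [hh] using hns
      · simp [hh]
    rw [← joinA_eq_ref ns node.toList]
    congr 2
    apply List.map_congr_left
    intro seg _
    simp only [Function.comp]
    exact appA_ns ns (stripNS seg) hne

-- ===== VERDICT (by name: the statement is the Claim_ definition above) =====
theorem replace_namespace_spec : Claim_equal_replace_namespace := by
  intro node namespace_ _
  unfold Spec_replace_namespace
  rw [a_eq_ref, alt_eq_ref]
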